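-- pv_equiv track=rewrite | github.com/jsmolka/python-sandbox | cs/goedel.py | goedel_to_word
-- ===== SOURCE A (Python) =====
-- def goedel_to_word(number, sigma):
--     """Converts Goedel number to word"""
--     base = len(sigma) + 1
--     s = str()
--     while number > base:
--         s += sigma[number % base - 1]
--         number = number // base
--
--     s += sigma[number % base - 1]
--
--     s = "".join(reversed(s))  # Reverse string
--     return s
-- ===== SOURCE B (Python) =====
-- def goedel_to_word(number, sigma):
--     """Converts Goedel number to word"""
--     base = len(sigma) + 1
--
--     def digits(n):
--         # least-significant digit first
--         return [n % base] if n <= base else [n % base] + digits(n // base)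
--
--     word = "".join(sigma[d - 1] for d in digits(number))
--     return word[::-1]
-- ===== Notes on version B (the rewrite author's own statement) =====
-- stated objective: simpler
-- what changed: Replaces A's single while-loop that interleaves digit extraction with string accumulation (plus a final whole-string reversal via join(reversed(s))) by a two-phase decomposition: a recursive function that extracts the base-(len(sigma)+1) digit list, then one join mapping digits to symbols, reversed once with a slice.
import Mathlib
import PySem

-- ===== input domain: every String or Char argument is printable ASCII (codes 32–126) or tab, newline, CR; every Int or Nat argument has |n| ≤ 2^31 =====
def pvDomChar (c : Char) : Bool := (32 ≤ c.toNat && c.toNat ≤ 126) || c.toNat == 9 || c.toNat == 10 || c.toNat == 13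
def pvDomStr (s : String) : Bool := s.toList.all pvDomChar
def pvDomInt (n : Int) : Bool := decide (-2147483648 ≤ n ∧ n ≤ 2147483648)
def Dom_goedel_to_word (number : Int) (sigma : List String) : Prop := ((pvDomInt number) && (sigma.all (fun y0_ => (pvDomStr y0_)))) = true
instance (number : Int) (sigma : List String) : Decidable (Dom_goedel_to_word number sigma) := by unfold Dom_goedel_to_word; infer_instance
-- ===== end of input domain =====

-- B replaces A's accumulator loop + whole-string reversal bookkeeping by a two-phase
-- decomposition: a recursive digit extraction, then one symbol-mapping join (objective: simpler).

-- ===== PORT A =====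
-- A's while loop: mutates (number, s); '2 ≤ base' is a totality guard only (with
-- base = len(sigma)+1 ≤ 1, i.e. sigma = [], Python raises and Pre_ excludes the input).
def goedelLoopA (base : Int) (sigma : List String) (number : Int) (s : List Char) : Int × List Char :=
  if h : base < number ∧ 2 ≤ base then
    goedelLoopA base sigma (PySem.Int.floordiv number base)
      (s ++ ((PySem.List.pyGet? sigma (PySem.Int.mod number base - 1)).getD "").toList)
  else (number, s)
termination_by number.toNat
decreasing_by
  have hlt : PySem.Int.floordiv number base < number :=
    (PySem.Int.floordiv_lt_iff_lt_mul (by omega)).mpr (by nlinarith [h.1, h.2])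
  have hnn : (0 : Int) ≤ PySem.Int.floordiv number base :=
    (PySem.Int.le_floordiv_iff_mul_le (by omega)).mpr (by nlinarith [h.1, h.2])
  omega

def goedel_to_word (number : Int) (sigma : List String) : String :=
  let base : Int := sigma.length + 1
  let r := goedelLoopA base sigma number []
  let s := r.2 ++ ((PySem.List.pyGet? sigma (PySem.Int.mod r.1 base - 1)).getD "").toList
  String.mk s.reverse

-- ===== PORT B =====
-- digits(n): least-significant first; 'base ≤ 1' is the same totality guard (outside Pre_).
def goedelDigitsB (base : Int) (number : Int) : List Int :=
  if h : number ≤ base ∨ base ≤ 1 then [PySem.Int.mod number base]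
  else PySem.Int.mod number base :: goedelDigitsB base (PySem.Int.floordiv number base)
termination_by number.toNat
decreasing_by
  have hlt : PySem.Int.floordiv number base < number :=
    (PySem.Int.floordiv_lt_iff_lt_mul (by omega)).mpr
      (by simp only [not_or, not_le] at h; nlinarith [h.1, h.2])
  have hnn : (0 : Int) ≤ PySem.Int.floordiv number base :=
    (PySem.Int.le_floordiv_iff_mul_le (by omega)).mpr
      (by simp only [not_or, not_le] at h; nlinarith [h.1, h.2])
  omega

def goedel_to_word_alt (number : Int) (sigma : List String) : String :=
  let base : Int := sigma.length + 1
  let word := String.join ((goedelDigitsB base number).map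
    (fun d => (PySem.List.pyGet? sigma (d - 1)).getD ""))
  String.mk word.toList.reverse

-- ===== PRECONDITION & SPEC =====
-- Pre_ excludes exactly sigma = [], on which Python A raises IndexError.
def Pre_goedel_to_word (number : Int) (sigma : List String) : Prop := sigma ≠ []
instance (number : Int) (sigma : List String) : Decidable (Pre_goedel_to_word number sigma) := by unfold Pre_goedel_to_word; infer_instance
def pvWitness_goedel_to_word : Int × List String := (5, ["a", "b"])

def Spec_goedel_to_word (number : Int) (sigma : List String) (out : String) : Prop := out = goedel_to_word_alt number sigma
instance (number : Int) (sigma : List String) (out : String) : Decidable (Spec_goedel_to_word number sigma out) := by unfold Spec_goedel_to_word; infer_instance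

-- ===== CLAIM (what is proved, stated in full; the proofs are below) =====
def Claim_equal_goedel_to_word : Prop := ∀ (number : Int) (sigma : List String), Dom_goedel_to_word number sigma → Pre_goedel_to_word number sigma → Spec_goedel_to_word number sigma (goedel_to_word number sigma)

-- ===== LEMMAS AND PROOFS =====

theorem join_toList (l : List String) (acc : String) :
    (l.foldl (· ++ ·) acc).toList = acc.toList ++ l.flatMap String.toList := by
  induction l generalizing acc with
  | nil => simp
  | cons x xs ih => simp [List.foldl, ih]

-- the characters A's loop has emitted, plus the post-loop symbol, equal
-- B's digit list mapped to symbols and flattened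
theorem loopA_eq_digitsB (base : Int) (sigma : List String) (hb : 2 ≤ base) :
    ∀ (n : Int) (s : List Char),
      (goedelLoopA base sigma n s).2 ++
        ((PySem.List.pyGet? sigma (PySem.Int.mod (goedelLoopA base sigma n s).1 base - 1)).getD "").toList
      = s ++ (goedelDigitsB base n).flatMap
          (fun d => ((PySem.List.pyGet? sigma (d - 1)).getD "").toList) := by
  intro n s
  fun_induction goedelLoopA base sigma n s with
  | case1 n s h ih =>
      rw [goedelDigitsB]
      rw [dif_neg (by omega)]
      simp only [List.flatMap_cons]
      rw [ih]
      simp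
  | case2 n s h =>
      rw [goedelDigitsB]
      rw [dif_pos (by omega)]
      simp

-- ===== VERDICT =====
theorem goedel_to_word_spec : Claim_equal_goedel_to_word := by
  intro number sigma _ hpre
  unfold Spec_goedel_to_word goedel_to_word goedel_to_word_alt
  have hlen : 1 ≤ sigma.length := by
    cases sigma with
    | nil => exact absurd rfl hpre
    | cons a l => simp
  have hb : (2 : Int) ≤ (sigma.length : Int) + 1 := by exact_mod_cast Nat.succ_le_succ hlen
  simp only []
  have h := loopA_eq_digitsB ((sigma.length : Int) + 1) sigma hb number []
  simp only [List.nil_append] at h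
  rw [h]
  congr 1
  rw [String.join, join_toList]
  simp [List.flatMap_map]
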